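-- pv_equiv track=rewrite | github.com/wyk18703232953/myResearch | codeComplex/data/filteredData/python/cubic/python_cubic_0605.py | solve_instance
-- ===== SOURCE A (Python) =====
-- INF = 250005
--
-- def solve_instance(n, m, lesson, days_strs):
--     # 转换 days_strs 为 days 列表（每行存放开课的节次下标，从 1 开始）
--     days = [[] for _ in range(n)]
--     for i in range(n):
--         s = days_strs[i]
--         for j in range(m):
--             if s[j] == "1":
--                 days[i].append(j + 1)
--
--     # m_cost[i][j]: 第 i 天选 j 节课时，最小的连续区间长度代价
--     m_cost = [[INF for _ in range(lesson + 2)] for _ in range(n + 1)]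
--     for i in range(n):
--         for j in range(lesson + 1):
--             if j <= len(days[i]):
--                 if j == len(days[i]):
--                     m_cost[i][j] = 0
--                 else:
--                     best = INF
--                     for k in range(0, j + 1):
--                         left = days[i][0 + k]
--                         right = days[i][-1 * max(1, 1 + (j - k))]
--                         best = min(best, right - left + 1)
--                     m_cost[i][j] = best
--
--     # dp[i][j]: 前 i+1 天（0..i），总共选 j 节课时的最小代价
--     dp = [[INF for _ in range(lesson + 2)] for _ in range(n + 1)]
--
--     for j in range(lesson + 1):
--         dp[0][j] = m_cost[0][j]
--
--     for i in range(1, n):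
--         for j in range(lesson + 1):
--             best = INF
--             for k in range(j + 1):
--                 best = min(best, dp[i - 1][j - k] + m_cost[i][k])
--             dp[i][j] = best
--
--     return min(dp[n - 1][:lesson + 1])
-- ===== SOURCE B (Python) =====
-- INF = 250005
--
-- def solve_instance(n, m, lesson, days_strs):
--     # Divide and conquer: each day yields a skip-cost vector; vectors are
--     # combined by capped min-plus merging over a balanced binary split of the
--     # days (correct since the capped merge is associative on the nonnegative
--     # cost vectors), instead of A's row-by-row dp table.  n == 0 means there
--     # is no last day: INF.
--     if n == 0:
--         return INF
--     def cost_vec(i):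
--         slots = [p + 1 for p in range(m) if days_strs[i][p] == "1"]
--         L = len(slots)
--         vec = []
--         for j in range(lesson + 1):
--             if j > L:
--                 vec.append(INF)
--             elif j == L:
--                 vec.append(0)
--             else:
--                 w = L - j  # keep w lessons: shortest window of w consecutive slots
--                 vec.append(min(INF, min(slots[t + w - 1] - slots[t] + 1
--                                         for t in range(j + 1))))
--         return vec
--     def merge(a, b):
--         return [min(INF, min(a[j - k] + b[k] for k in range(j + 1)))
--                 for j in range(lesson + 1)]
--     def total(lo, hi):
--         if hi - lo == 1:
--             return cost_vec(lo)
--         mid = (lo + hi) // 2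
--         return merge(total(lo, mid), total(mid, hi))
--     return min(total(0, n))
-- ===== Notes on version B (the rewrite author's own statement) =====
-- stated objective: alternative
-- what changed: B replaces A's staged days/m_cost/dp tables and row-by-row forward DP with a recursive divide and conquer: per-day skip-cost vectors built from fixed-width sliding windows are combined by a capped min-plus merge over a balanced binary split of the days (valid because the capped merge is associative on nonnegative cost vectors); A's dp[-1] result for n==0 becomes an explicit early return.
import Mathlib
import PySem

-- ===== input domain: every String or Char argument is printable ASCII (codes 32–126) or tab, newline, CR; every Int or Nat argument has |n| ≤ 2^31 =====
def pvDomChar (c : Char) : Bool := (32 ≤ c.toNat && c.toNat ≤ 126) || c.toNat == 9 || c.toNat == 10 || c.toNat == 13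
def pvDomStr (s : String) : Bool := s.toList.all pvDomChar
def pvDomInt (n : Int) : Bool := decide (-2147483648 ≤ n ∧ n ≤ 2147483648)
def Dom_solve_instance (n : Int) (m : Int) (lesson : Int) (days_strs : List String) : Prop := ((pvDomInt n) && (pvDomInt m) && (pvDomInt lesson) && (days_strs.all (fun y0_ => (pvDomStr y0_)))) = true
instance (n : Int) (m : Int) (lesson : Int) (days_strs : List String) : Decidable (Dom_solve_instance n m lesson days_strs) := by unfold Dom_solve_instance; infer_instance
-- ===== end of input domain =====

-- B replaces A's staged days/m_cost/dp tables by a recursive divide and conquer: per-day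
-- skip-cost vectors are combined by a capped min-plus merge over a balanced binary split of
-- the days (objective: alternative, same cost).

-- ===== PORT A =====
def pvINF : Int := 250005

def pvDaysA (n m : Int) (days_strs : List String) : List (List Int) :=
  (PySem.List.pyRange 0 n 1).foldl (fun d i =>
      let s := PySem.List.pyGetD days_strs i ""
      PySem.List.pySetD d i ((PySem.List.pyRange 0 m 1).foldl (fun di j =>
        if PySem.Str.pyGet? s j = some '1' then di ++ [j + 1] else di)
        (PySem.List.pyGetD d i []))) ((PySem.List.pyRange 0 n 1).map (fun _ => []))

def pvBestA (di : List Int) (j : Int) : Int :=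
  (PySem.List.pyRange 0 (j+1) 1).foldl (fun best k =>
    let left := PySem.List.pyGetD di (0 + k) 0
    let right := PySem.List.pyGetD di (-1 * max 1 (1 + (j - k))) 0
    min best (right - left + 1)) pvINF

-- Python list rows are mutable arrays: m_cost/dp rows are ported as `Array Int` with
-- in-place element assignment (`List.modify`/`Array.setIfInBounds`), the exact semantics of
-- Python's `t[i][j] = v`; the element-level equality with the pure-list reading (pvMCostL /
-- pvDPL below) is proved in pv_mcost_bridge / pv_dpa_bridge.
def pvAGetD (r : Array Int) (i : Int) (d : Int) : Int :=
  match PySem.List.pyIdx? r.size i with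
  | some k => r.getD k d
  | none => d

def pvASetD (r : Array Int) (i : Int) (v : Int) : Array Int :=
  match PySem.List.pyIdx? r.size i with
  | some k => r.setIfInBounds k v
  | none => r

def pvSet2A (t : List (Array Int)) (i j : Int) (v : Int) : List (Array Int) :=
  match PySem.List.pyIdx? t.length i with
  | some k => t.modify k (fun r => pvASetD r j v)
  | none => t

def pvMCostA (n lesson : Int) (days : List (List Int)) : List (Array Int) :=
  (PySem.List.pyRange 0 n 1).foldl (fun mc i =>
      (PySem.List.pyRange 0 (lesson+1) 1).foldl (fun mc2 j =>
        if j ≤ PySem.List.len (PySem.List.pyGetD days i []) then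
          if j = PySem.List.len (PySem.List.pyGetD days i []) then pvSet2A mc2 i j 0
          else pvSet2A mc2 i j (pvBestA (PySem.List.pyGetD days i []) j)
        else mc2) mc)
    ((PySem.List.pyRange 0 (n+1) 1).map
      (fun _ => ((PySem.List.pyRange 0 (lesson+2) 1).map (fun _ => pvINF)).toArray))

def pvDPA (n lesson : Int) (m_cost : List (Array Int)) : List (Array Int) :=
  (PySem.List.pyRange 1 n 1).foldl (fun t i =>
      (PySem.List.pyRange 0 (lesson+1) 1).foldl (fun t j =>
        pvSet2A t i j ((PySem.List.pyRange 0 (j+1) 1).foldl (fun best k =>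
          min best (pvAGetD (PySem.List.pyGetD t (i-1) #[]) (j-k) 0 +
                    pvAGetD (PySem.List.pyGetD m_cost i #[]) k 0)) pvINF)) t)
    ((PySem.List.pyRange 0 (lesson+1) 1).foldl (fun t j =>
        pvSet2A t 0 j (pvAGetD (PySem.List.pyGetD m_cost 0 #[]) j 0))
      ((PySem.List.pyRange 0 (n+1) 1).map
        (fun _ => ((PySem.List.pyRange 0 (lesson+2) 1).map (fun _ => pvINF)).toArray)))

def solve_instance (n : Int) (m : Int) (lesson : Int) (days_strs : List String) : Int :=
  (PySem.List.min? (PySem.List.slice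
    ((PySem.List.pyGetD (pvDPA n lesson (pvMCostA n lesson (pvDaysA n m days_strs))) (n-1) #[]).toList)
    none (some (lesson+1))) (fun x => x)).getD 0

-- ===== PORT B =====
-- Python's `slots = [p + 1 for p in range(m) if days_strs[i][p] == "1"]`
def pvSlotsB (m : Int) (ds : List String) (i : Int) : List Int :=
  ((PySem.List.pyRange 0 m 1).filter (fun j =>
      decide (PySem.Str.pyGet? (PySem.List.pyGetD ds i "") j = some '1'))).map (fun j => j + 1)

-- Python's cost_vec(i) (the loop appending one entry per j)
def pvCostVecB (m lesson : Int) (ds : List String) (i : Int) : List Int :=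
  (PySem.List.pyRange 0 (lesson+1) 1).map (fun j =>
    if PySem.List.len (pvSlotsB m ds i) < j then pvINF
    else if j = PySem.List.len (pvSlotsB m ds i) then 0
    else min pvINF ((PySem.List.min? ((PySem.List.pyRange 0 (j+1) 1).map (fun t =>
      PySem.List.pyGetD (pvSlotsB m ds i) (t + (PySem.List.len (pvSlotsB m ds i) - j) - 1) 0 -
      PySem.List.pyGetD (pvSlotsB m ds i) t 0 + 1)) (fun x => x)).getD 0))

-- Python's merge(a, b)
def pvMergeB (a b : List Int) (lesson : Int) : List Int :=
  (PySem.List.pyRange 0 (lesson+1) 1).map (fun j =>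
    min pvINF ((PySem.List.min? ((PySem.List.pyRange 0 (j+1) 1).map (fun k =>
      PySem.List.pyGetD a (j-k) 0 + PySem.List.pyGetD b k 0)) (fun x => x)).getD 0))

-- Python's total(lo, hi); the fuel argument (segment length hi-lo at the top call, and the
-- `hi - lo ≤ 1` reading of Python's `hi - lo == 1`) is only a structural totalization guard:
-- on Python's reachable calls fuel ≥ hi - lo ≥ 1 and the fuel branch is never taken.
def pvTotalB (m lesson : Int) (ds : List String) : Nat → Int → Int → List Int
  | 0, lo, _ => pvCostVecB m lesson ds lo
  | (fuel+1), lo, hi =>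
    if hi - lo ≤ 1 then pvCostVecB m lesson ds lo
    else pvMergeB (pvTotalB m lesson ds fuel lo (PySem.Int.floordiv (lo + hi) 2))
                  (pvTotalB m lesson ds fuel (PySem.Int.floordiv (lo + hi) 2) hi) lesson

def solve_instance_alt (n : Int) (m : Int) (lesson : Int) (days_strs : List String) : Int :=
  if n = 0 then pvINF
  else (PySem.List.min? (pvTotalB m lesson days_strs n.toNat 0 n) (fun x => x)).getD 0

-- ===== PRECONDITION & SPEC =====
-- Pre_ is exactly where the Python A returns normally: n and lesson nonnegative (negative n
-- makes dp[-1]/dp[0] raise IndexError, negative lesson makes min([]) raise ValueError),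
-- days_strs has at least n rows (else days_strs[i] raises IndexError), and each of the first
-- n rows has at least m characters when m > 0 (else s[j] raises IndexError).
def Pre_solve_instance (n : Int) (m : Int) (lesson : Int) (days_strs : List String) : Prop :=
  0 ≤ n ∧ 0 ≤ lesson ∧ n ≤ PySem.List.len days_strs ∧
  (0 < m → ∀ s ∈ days_strs.take n.toNat, m ≤ PySem.Str.len s)

instance (n : Int) (m : Int) (lesson : Int) (days_strs : List String) : Decidable (Pre_solve_instance n m lesson days_strs) := by unfold Pre_solve_instance; infer_instance

def pvWitness_solve_instance : Int × Int × Int × List String := (1, 1, 0, ["1"])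

def Spec_solve_instance (n : Int) (m : Int) (lesson : Int) (days_strs : List String) (out : Int) : Prop := out = solve_instance_alt n m lesson days_strs
instance (n : Int) (m : Int) (lesson : Int) (days_strs : List String) (out : Int) : Decidable (Spec_solve_instance n m lesson days_strs out) := by unfold Spec_solve_instance; infer_instance

-- ===== CLAIM (what is proved, stated in full; the proofs are below) =====
def Claim_equal_solve_instance : Prop := ∀ (n : Int) (m : Int) (lesson : Int) (days_strs : List String), Dom_solve_instance n m lesson days_strs → Pre_solve_instance n m lesson days_strs → Spec_solve_instance n m lesson days_strs (solve_instance n m lesson days_strs)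

-- ===== LEMMAS AND PROOFS =====

def pvSet2 (t : List (List Int)) (i j : Int) (v : Int) : List (List Int) :=
  PySem.List.pySetD t i (PySem.List.pySetD (PySem.List.pyGetD t i []) j v)

-- pure-list reading of A's tables (used only by the proofs; pv_arr_to_list links the port to it)
def pvMCostL (n lesson : Int) (days : List (List Int)) : List (List Int) :=
  (PySem.List.pyRange 0 n 1).foldl (fun mc i =>
      (PySem.List.pyRange 0 (lesson+1) 1).foldl (fun mc2 j =>
        let di := PySem.List.pyGetD days i []
        if j ≤ PySem.List.len di then
          if j = PySem.List.len di then pvSet2 mc2 i j 0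
          else pvSet2 mc2 i j (pvBestA di j)
        else mc2) mc)
    ((PySem.List.pyRange 0 (n+1) 1).map
      (fun _ => (PySem.List.pyRange 0 (lesson+2) 1).map (fun _ => pvINF)))

def pvDPL (n lesson : Int) (m_cost : List (List Int)) : List (List Int) :=
  (PySem.List.pyRange 1 n 1).foldl (fun t i =>
      (PySem.List.pyRange 0 (lesson+1) 1).foldl (fun t j =>
        pvSet2 t i j ((PySem.List.pyRange 0 (j+1) 1).foldl (fun best k =>
          min best (PySem.List.pyGetD (PySem.List.pyGetD t (i-1) []) (j-k) 0 +
                    PySem.List.pyGetD (PySem.List.pyGetD m_cost i []) k 0)) pvINF)) t)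
    ((PySem.List.pyRange 0 (lesson+1) 1).foldl (fun t j =>
        pvSet2 t 0 j (PySem.List.pyGetD (PySem.List.pyGetD m_cost 0 []) j 0))
      ((PySem.List.pyRange 0 (n+1) 1).map
        (fun _ => (PySem.List.pyRange 0 (lesson+2) 1).map (fun _ => pvINF))))

theorem pv_pyIdx_lt (n : Nat) (i : Int) (k : Nat) (h : PySem.List.pyIdx? n i = some k) : k < n := by
  unfold PySem.List.pyIdx? at h
  split_ifs at h <;> simp_all <;> omega

theorem pv_agetd_bridge (r : Array Int) (i : Int) (d : Int) :
    pvAGetD r i d = PySem.List.pyGetD r.toList i d := by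
  unfold pvAGetD PySem.List.pyGetD PySem.List.pyGet?
  rw [Array.length_toList]
  cases hk : PySem.List.pyIdx? r.size i with
  | none => simp
  | some k =>
    have hlt := pv_pyIdx_lt _ _ _ hk
    simp [Array.getD, hlt, List.getElem?_eq_getElem (by simpa using hlt : k < r.toList.length)]

theorem pv_asetd_bridge (r : Array Int) (i : Int) (v : Int) :
    (pvASetD r i v).toList = PySem.List.pySetD r.toList i v := by
  unfold pvASetD PySem.List.pySetD PySem.List.pySet?
  rw [Array.length_toList]
  cases hk : PySem.List.pyIdx? r.size i with
  | none => simp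
  | some k => simp [Array.toList_setIfInBounds]

theorem pv_getd_map_toList (t : List (Array Int)) (i : Int) :
    (PySem.List.pyGetD t i #[]).toList = PySem.List.pyGetD (t.map Array.toList) i [] := by
  unfold PySem.List.pyGetD PySem.List.pyGet?
  rw [List.length_map]
  cases hk : PySem.List.pyIdx? t.length i with
  | none => simp
  | some k =>
    have hlt := pv_pyIdx_lt _ _ _ hk
    simp [List.getElem?_eq_getElem hlt, List.getElem?_eq_getElem (by simpa using hlt : k < (t.map Array.toList).length)]

theorem pv_set2_bridge (t : List (Array Int)) (i j : Int) (v : Int) :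
    (pvSet2A t i j v).map Array.toList = pvSet2 (t.map Array.toList) i j v := by
  unfold pvSet2A pvSet2
  conv_rhs => rw [show PySem.List.pySetD (t.map Array.toList) i
      (PySem.List.pySetD (PySem.List.pyGetD (t.map Array.toList) i []) j v)
    = (PySem.List.pySet? (t.map Array.toList) i
        (PySem.List.pySetD (PySem.List.pyGetD (t.map Array.toList) i []) j v)).getD (t.map Array.toList) from rfl]
  unfold PySem.List.pySet?
  rw [List.length_map]
  cases hk : PySem.List.pyIdx? t.length i with
  | none => simp
  | some k =>
    have hlt := pv_pyIdx_lt _ _ _ hk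
    simp only [Option.map_some, Option.getD_some]
    rw [List.modify_eq_set, List.map_set]
    congr 1
    rw [pv_asetd_bridge]
    congr 1
    rw [← pv_getd_map_toList]
    congr 1
    unfold PySem.List.pyGetD PySem.List.pyGet?
    rw [hk]
    simp [List.getElem?_eq_getElem hlt]

theorem pv_fold_bridge {β : Type} (fA : List (Array Int) → β → List (Array Int))
    (fL : List (List Int) → β → List (List Int))
    (h : ∀ t x, (fA t x).map Array.toList = fL (t.map Array.toList) x) :
    ∀ (l : List β) (t0 : List (Array Int)),
    (l.foldl fA t0).map Array.toList = l.foldl fL (t0.map Array.toList) := by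
  intro l
  induction l with
  | nil => intro t0; rfl
  | cons x t ih =>
    intro t0
    simp only [List.foldl_cons]
    rw [ih (fA t0 x), h t0 x]

theorem pv_mcost_bridge (n lesson : Int) (days : List (List Int)) :
    (pvMCostA n lesson days).map Array.toList = pvMCostL n lesson days := by
  unfold pvMCostA pvMCostL
  have hinit : ((PySem.List.pyRange 0 (n+1) 1).map
        (fun _ => ((PySem.List.pyRange 0 (lesson+2) 1).map (fun _ => pvINF)).toArray)).map Array.toList
      = (PySem.List.pyRange 0 (n+1) 1).map
        (fun _ => (PySem.List.pyRange 0 (lesson+2) 1).map (fun _ => pvINF)) := by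
    simp
  rw [← hinit]
  apply pv_fold_bridge
  intro t i
  apply pv_fold_bridge
  intro t2 j
  by_cases h1 : j ≤ PySem.List.len (PySem.List.pyGetD days i [])
  · by_cases h2 : j = PySem.List.len (PySem.List.pyGetD days i [])
    · simp only [h1, h2, if_true, le_refl]
      exact pv_set2_bridge t2 i _ 0
    · simp only [h1, h2, if_true, if_false]
      exact pv_set2_bridge t2 i j _
  · simp only [h1, if_false]

theorem pv_dpa_bridge (n lesson : Int) (mc : List (Array Int)) :
    (pvDPA n lesson mc).map Array.toList = pvDPL n lesson (mc.map Array.toList) := by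
  unfold pvDPA pvDPL
  have htab : ((PySem.List.pyRange 0 (n+1) 1).map
        (fun _ => ((PySem.List.pyRange 0 (lesson+2) 1).map (fun _ => pvINF)).toArray)).map Array.toList
      = (PySem.List.pyRange 0 (n+1) 1).map
        (fun _ => (PySem.List.pyRange 0 (lesson+2) 1).map (fun _ => pvINF)) := by
    simp
  have hinit : ((PySem.List.pyRange 0 (lesson+1) 1).foldl (fun t j =>
        pvSet2A t 0 j (pvAGetD (PySem.List.pyGetD mc 0 #[]) j 0))
        ((PySem.List.pyRange 0 (n+1) 1).map
          (fun _ => ((PySem.List.pyRange 0 (lesson+2) 1).map (fun _ => pvINF)).toArray))).map Array.toList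
      = (PySem.List.pyRange 0 (lesson+1) 1).foldl (fun t j =>
        pvSet2 t 0 j (PySem.List.pyGetD (PySem.List.pyGetD (mc.map Array.toList) 0 []) j 0))
        ((PySem.List.pyRange 0 (n+1) 1).map
          (fun _ => (PySem.List.pyRange 0 (lesson+2) 1).map (fun _ => pvINF))) := by
    rw [← htab]
    apply pv_fold_bridge
    intro t2 j
    simp only [pv_agetd_bridge, pv_getd_map_toList]
    exact pv_set2_bridge t2 0 j _
  rw [← hinit]
  apply pv_fold_bridge
  intro t i
  apply pv_fold_bridge
  intro t2 j
  simp only [pv_agetd_bridge, pv_getd_map_toList]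
  exact pv_set2_bridge t2 i j _

theorem pv_arr_to_list (n m lesson : Int) (ds : List String) :
    solve_instance n m lesson ds
      = (PySem.List.min? (PySem.List.slice
          (PySem.List.pyGetD (pvDPL n lesson (pvMCostL n lesson (pvDaysA n m ds))) (n-1) [])
          none (some (lesson+1))) (fun x => x)).getD 0 := by
  unfold solve_instance
  rw [pv_getd_map_toList, pv_dpa_bridge, pv_mcost_bridge]

-- min-fold pulls through an outer min
theorem pv_min_foldl (t : List Int) : ∀ (a x : Int), min a (t.foldl min x) = t.foldl min (min a x) := by
  induction t with
  | nil => intro a x; rfl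
  | cons y t ih =>
    intro a x
    simp only [List.foldl_cons]
    rw [← ih, ← ih, min_assoc]

-- min(INF, min(list)) via min? equals foldl min INF  (nonempty list)
theorem pv_minq_foldl (x : Int) (t : List Int) (a : Int) :
    min a ((PySem.List.min? (x :: t) (fun y => y)).getD 0) = (x :: t).foldl min a := by
  rw [PySem.List.min?_id_cons]
  simp only [Option.getD_some, List.foldl_cons]
  exact pv_min_foldl t a x

-- set on a range-map
theorem pv_set_map_range {α : Type} (n k : Nat) (f : Nat → α) (v : α) (hk : k < n) :
    ((List.range n).map f).set k v = (List.range n).map (fun q => if q = k then v else f q) := by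
  apply List.ext_getElem
  · simp
  · intro i h1 h2
    simp only [List.getElem_set, List.getElem_map, List.getElem_range]
    by_cases h3 : i = k
    · simp [h3]
    · simp [h3, Ne.symm h3]

theorem pv_getD_map_range {α : Type} (n k : Nat) (f : Nat → α) (d : α) :
    ((List.range n).map f).getD k d = if k < n then f k else d := by
  rcases Nat.lt_or_ge k n with h | h
  · rw [List.getD_eq_getElem _ _ (by simpa using h)]; simp [h]
  · rw [List.getD_eq_default _ _ (by simpa using h)]; simp [Nat.not_lt.mpr h]

-- pyRange 0 n 1 fold/map to Nat range
theorem pv_pyRange_to_range (n : Int) :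
    PySem.List.pyRange 0 n 1 = (List.range n.toNat).map (fun k : Nat => (k : Int)) := by
  rw [PySem.List.pyRange_one]
  simp only [sub_zero, zero_add]

theorem pv_map_pyRange (n : Int) {α : Type} (f : Int → α) :
    (PySem.List.pyRange 0 n 1).map f = (List.range n.toNat).map (fun k : Nat => f (k : Int)) := by
  rw [pv_pyRange_to_range n, List.map_map]
  rfl

theorem pv_foldl_pyRange (n : Int) {α : Type} (g : α → Int → α) (init : α) :
    (PySem.List.pyRange 0 n 1).foldl g init = (List.range n.toNat).foldl (fun (t : α) (k : Nat) => g t (k : Int)) init := by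
  rw [pv_pyRange_to_range n, List.foldl_map]

theorem pv_set_getD_self {α : Type} (t : List α) (i : Nat) (d : α) (hi : i < t.length) :
    t.set i (t.getD i d) = t := by
  rw [List.getD_eq_getElem t d hi]
  exact List.set_getElem_self hi

theorem pv_getD_set_self {α : Type} (t : List α) (i : Nat) (r d : α) (hi : i < t.length) :
    (t.set i r).getD i d = r := by
  rw [List.getD_eq_getElem _ d (by simpa using hi)]
  simp [hi]

theorem pv_getD_set_ne {α : Type} (t : List α) (i j : Nat) (r d : α) (h : j ≠ i) :
    (t.set i r).getD j d = t.getD j d := by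
  rcases Nat.lt_or_ge j t.length with hl | hl
  · rw [List.getD_eq_getElem _ d (by simpa using hl), List.getD_eq_getElem _ d hl]
    simp [List.getElem_set, Ne.symm h]
  · rw [List.getD_eq_default _ _ (by simpa using hl), List.getD_eq_default _ _ (by simpa using hl)]

-- inner (per-row) table fold reduces to a fold on the row
theorem pv_tablefold (l : List Nat) (i : Nat) (P : Nat → Prop) [DecidablePred P] (G : Nat → List (List Int) → Int) :
    ∀ (t : List (List Int)) (r0 : List Int), i < t.length →
    (∀ j r, G j (t.set i r) = G j t) →
    l.foldl (fun t' j => if P j then t'.set i ((t'.getD i []).set j (G j t')) else t') (t.set i r0)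
    = t.set i (l.foldl (fun r j => if P j then r.set j (G j t) else r) r0) := by
  induction l with
  | nil => intro t r0 hi hG; rfl
  | cons j l ih =>
    intro t r0 hi hG
    simp only [List.foldl_cons]
    by_cases hp : P j
    · simp only [hp, if_true]
      rw [pv_getD_set_self t i r0 [] hi, List.set_set, hG]
      exact ih t _ hi hG
    · simp only [hp, if_false]
      exact ih t r0 hi hG

-- a fold setting row entries with values independent of the row
theorem pv_rowfold (P : Nat → Prop) [DecidablePred P] (G : Nat → Int) (N : Nat) (F : Nat → Int) :
    ∀ (bN : Nat), bN ≤ N →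
    (List.range bN).foldl (fun r j => if P j then r.set j (G j) else r) ((List.range N).map F)
    = (List.range N).map (fun q => if q < bN ∧ P q then G q else F q) := by
  intro bN
  induction bN with
  | zero =>
    intro _
    apply List.map_congr_left
    intro q hq
    simp
  | succ b ih =>
    intro hb
    rw [List.range_succ, List.foldl_append, ih (by omega)]
    simp only [List.foldl_cons, List.foldl_nil]
    by_cases hp : P b
    · simp only [hp, if_true]
      rw [pv_set_map_range N b _ _ (by omega)]
      apply List.map_congr_left
      intro q hq
      by_cases h1 : q = b
      · simp [h1, hp]
      · rw [if_neg h1]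
        apply if_congr _ rfl rfl
        constructor
        · rintro ⟨hlt, hPq⟩; exact ⟨by omega, hPq⟩
        · rintro ⟨hlt, hPq⟩; exact ⟨by omega, hPq⟩
    · simp only [hp, if_false]
      apply List.map_congr_left
      intro q hq
      apply if_congr _ rfl rfl
      constructor
      · rintro ⟨hlt, hPq⟩; exact ⟨by omega, hPq⟩
      · rintro ⟨hlt, hPq⟩
        by_cases h1 : q = b
        · exact absurd (h1 ▸ hPq) hp
        · exact ⟨by omega, hPq⟩

theorem pv_tablefold' (l : List Nat) (i : Nat) (G : Nat → List (List Int) → Int) :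
    ∀ (t : List (List Int)) (r0 : List Int), i < t.length →
    (∀ j r, G j (t.set i r) = G j t) →
    l.foldl (fun t' j => t'.set i ((t'.getD i []).set j (G j t'))) (t.set i r0)
    = t.set i (l.foldl (fun r j => r.set j (G j t)) r0) := by
  induction l with
  | nil => intro t r0 hi hG; rfl
  | cons j l ih =>
    intro t r0 hi hG
    simp only [List.foldl_cons]
    rw [pv_getD_set_self t i r0 [] hi, List.set_set, hG]
    exact ih t _ hi hG

theorem pv_rowfold' (G : Nat → Int) (N : Nat) (F : Nat → Int) :
    ∀ (bN : Nat), bN ≤ N →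
    (List.range bN).foldl (fun r j => r.set j (G j)) ((List.range N).map F)
    = (List.range N).map (fun q => if q < bN then G q else F q) := by
  intro bN
  induction bN with
  | zero =>
    intro _
    apply List.map_congr_left
    intro q hq
    simp
  | succ b ih =>
    intro hb
    rw [List.range_succ, List.foldl_append, ih (by omega)]
    simp only [List.foldl_cons, List.foldl_nil]
    rw [pv_set_map_range N b _ _ (by omega)]
    apply List.map_congr_left
    intro q hq
    by_cases h1 : q = b
    · simp [h1]
    · rw [if_neg h1]
      apply if_congr _ rfl rfl
      omega

-- outer fold over rows a, a+1, …, a+cnt-1, each set once from characterized state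
theorem pv_outerfold (N : Nat) (F0 D : Nat → List Int) (body : List (List Int) → Nat → List (List Int))
    (a : Nat) :
    ∀ (cnt : Nat), a + cnt ≤ N →
    (∀ i, a ≤ i → i < a + cnt →
       body ((List.range N).map (fun q => if q < i then D q else F0 q)) i
         = ((List.range N).map (fun q => if q < i then D q else F0 q)).set i (D i)) →
    (List.range cnt).foldl (fun t k => body t (a + k)) ((List.range N).map (fun q => if q < a then D q else F0 q))
      = (List.range N).map (fun q => if q < a + cnt then D q else F0 q) := by
  intro cnt
  induction cnt with
  | zero => intro _ _; rfl
  | succ c ih =>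
    intro hle hbody
    rw [List.range_succ, List.foldl_append, ih (by omega) (fun i h1 h2 => hbody i h1 (by omega))]
    simp only [List.foldl_cons, List.foldl_nil]
    rw [hbody (a + c) (by omega) (by omega)]
    rw [pv_set_map_range N (a + c) _ _ (by omega)]
    apply List.map_congr_left
    intro q hq
    by_cases h1 : q = a + c
    · simp [h1]
    · rw [if_neg h1]
      apply if_congr _ rfl rfl
      constructor
      · intro h; omega
      · intro h; omega

theorem pv_outerfold0 (N : Nat) (F0 D : Nat → List Int) (body : List (List Int) → Nat → List (List Int)) :
    ∀ (cnt : Nat), cnt ≤ N →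
    (∀ i, i < cnt →
       body ((List.range N).map (fun q => if q < i then D q else F0 q)) i
         = ((List.range N).map (fun q => if q < i then D q else F0 q)).set i (D i)) →
    (List.range cnt).foldl body ((List.range N).map F0)
      = (List.range N).map (fun q => if q < cnt then D q else F0 q) := by
  intro cnt hle hbody
  have h2 := pv_outerfold N F0 D body 0 cnt (by omega) (fun i hh1 hh2 => hbody i (by omega))
  simp only [Nat.zero_add] at h2
  rw [List.map_congr_left (l := List.range N) (f := F0)
      (g := fun q => if q < 0 then D q else F0 q) (by intro q hq; simp)]
  exact h2

theorem pv_foldl_min_const (a : Int) : ∀ (l : List Int), (∀ x ∈ l, x = a) → l.foldl min a = a := by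
  intro l
  induction l with
  | nil => intro _; rfl
  | cons x t ih =>
    intro h
    simp only [List.foldl_cons]
    rw [h x (by simp), min_self]
    exact ih (fun y hy => h y (by simp [hy]))

-- ===== semantic functions =====
def pvSlotsOf (m : Int) (days_strs : List String) (i : Nat) : List Int :=
  pvSlotsB m days_strs (i : Int)

def pvWin (slots : List Int) (j : Int) : Int :=
  ((PySem.List.pyRange 0 (j+1) 1).map (fun t =>
     PySem.List.pyGetD slots (t + (PySem.List.len slots - j) - 1) 0 - PySem.List.pyGetD slots t 0 + 1)).foldl min pvINF

def pvCostF (slots : List Int) (j : Int) : Int :=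
  if j = PySem.List.len slots then 0
  else if j < PySem.List.len slots then pvWin slots j
  else pvINF

def pvDP (m : Int) (ds : List String) : Nat → Int → Int
  | 0, j => pvCostF (pvSlotsOf m ds 0) j
  | (i+1), j => ((PySem.List.pyRange 0 (j+1) 1).map (fun k =>
      pvDP m ds i (j-k) + pvCostF (pvSlotsOf m ds (i+1)) k)).foldl min pvINF

-- min(INF, min(nonempty range-map)) is the INF-seeded min fold
theorem pv_minq (a : Int) (b : Int) (hb : 0 < b) (f : Int → Int) :
    min a ((PySem.List.min? ((PySem.List.pyRange 0 b 1).map f) (fun x => x)).getD 0)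
      = ((PySem.List.pyRange 0 b 1).map f).foldl min a := by
  rw [PySem.List.pyRange_one_cons (by omega)]
  simp only [List.map_cons]
  exact pv_minq_foldl _ _ _

-- A's inner best-loop (negative right index) equals the sliding-window min fold
theorem pv_best_eq_win (di : List Int) (j : Int) (h0 : 0 ≤ j) (hj : j < PySem.List.len di) :
    (PySem.List.pyRange 0 (j+1) 1).foldl (fun best k =>
        min best (PySem.List.pyGetD di (-1 * max 1 (1 + (j - k))) 0 - PySem.List.pyGetD di (0 + k) 0 + 1)) pvINF
      = pvWin di j := by
  unfold pvWin
  rw [List.foldl_map]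
  apply PySem.List.foldl_congr_mem
  intro acc k hk
  rw [PySem.List.mem_pyRange_one] at hk
  have hlen : PySem.List.len di = (di.length : Int) := by simp
  rw [hlen] at hj
  have hcong : PySem.List.pyGetD di (-1 * max 1 (1 + (j - k))) 0
      = PySem.List.pyGetD di (k + (PySem.List.len di - j) - 1) 0 := by
    have hmax : max 1 (1 + (j - k)) = 1 + (j - k) := max_eq_right (by omega)
    have hc : (-1) * max 1 (1 + (j - k)) = -(((1 + j - k).toNat : Nat) : Int) := by
      rw [hmax]; push_cast; omega
    rw [hc, PySem.List.pyGetD_neg_natCast di (1 + j - k).toNat 0 (by omega) (by omega)]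
    rw [PySem.List.pyGetD_eq_getElem di 0 (by rw [hlen]; omega) (by rw [hlen]; push_cast; omega)]
    congr 1
    rw [hlen]
    omega
  rw [hcong, zero_add]

-- ===== A's tables characterized (as in a bottom-up reading of A) =====
theorem pv_days_eq (n m : Int) (ds : List String) :
    pvDaysA n m ds = (List.range n.toNat).map (fun q => pvSlotsOf m ds q) := by
  unfold pvDaysA
  rw [pv_foldl_pyRange, pv_map_pyRange]
  simp only [PySem.List.pySetD_natCast, PySem.List.pyGetD_natCast]
  rw [pv_outerfold0 n.toNat (fun _ => ([] : List Int)) (fun q => pvSlotsOf m ds q) _ n.toNat (by omega) ?_]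
  · apply List.map_congr_left
    intro q hq
    rw [List.mem_range] at hq
    simp [hq]
  · intro i hi
    rw [pv_getD_map_range]
    rw [if_pos hi, if_neg (by omega)]
    rw [show (ds.getD i "") = PySem.List.pyGetD ds (i : Int) "" from (PySem.List.pyGetD_natCast ds i "").symm]
    rw [PySem.List.foldl_append_ite (fun j => PySem.Str.pyGet? (PySem.List.pyGetD ds (i : Int) "") j = some '1') (fun j => j + 1)]
    simp [pvSlotsOf, pvSlotsB]

def pvIRn (lesson : Int) : List Int := (List.range (lesson+2).toNat).map (fun _ => pvINF)

def pvMRow (m : Int) (ds : List String) (lesson : Int) (i : Nat) : List Int :=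
  (List.range (lesson+2).toNat).map (fun q : Nat =>
    if (q : Int) ≤ lesson then pvCostF (pvSlotsOf m ds i) (q : Int) else pvINF)

-- A's m_cost table rows are the capped day-cost vectors
theorem pv_mcost_eq (n m lesson : Int) (ds : List String) (hn : 0 ≤ n) (hl : 0 ≤ lesson) :
    pvMCostL n lesson ((List.range n.toNat).map (fun q => pvSlotsOf m ds q))
    = (List.range (n.toNat+1)).map (fun q => if q < n.toNat then pvMRow m ds lesson q else pvIRn lesson) := by
  unfold pvMCostL
  rw [pv_foldl_pyRange, pv_map_pyRange]
  have hir : (PySem.List.pyRange 0 (lesson+2) 1).map (fun _ => pvINF) = pvIRn lesson :=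
    pv_map_pyRange _ _
  rw [hir]
  rw [show (n+1).toNat = n.toNat + 1 from by omega]
  rw [pv_outerfold0 (n.toNat+1) (fun _ => pvIRn lesson) (fun q => pvMRow m ds lesson q) _
        n.toNat (by omega) ?_]
  intro i hi
  have hdi : PySem.List.pyGetD ((List.range n.toNat).map (fun q => pvSlotsOf m ds q)) (i : Int) []
      = pvSlotsOf m ds i := by
    rw [PySem.List.pyGetD_natCast, pv_getD_map_range]
    simp [hi]
  simp only [hdi]
  set di := pvSlotsOf m ds i with hdidef
  set L := PySem.List.len di with hLdef
  have hLnn : L = (di.length : Int) := by simp [hLdef]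
  have hb : (fun (mc2 : List (List Int)) (j : Int) =>
        if j ≤ L then
          if j = L then pvSet2 mc2 (i : Int) j 0
          else pvSet2 mc2 (i : Int) j (pvBestA di j)
        else mc2)
      = (fun mc2 j =>
        if j ≤ L then
          PySem.List.pySetD mc2 (i : Int)
            (PySem.List.pySetD (PySem.List.pyGetD mc2 (i : Int) []) j
              (if j = L then 0 else pvBestA di j))
        else mc2) := by
    funext mc2 j
    by_cases h1 : j ≤ L
    · by_cases h2 : j = L <;> simp [h1, h2, pvSet2]
    · simp [h1]
  rw [hb, pv_foldl_pyRange]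
  simp only [PySem.List.pySetD_natCast, PySem.List.pyGetD_natCast]
  set T := (List.range (n.toNat+1)).map (fun q => if q < i then pvMRow m ds lesson q else pvIRn lesson) with hT
  have hiT : i < T.length := by rw [hT]; simp; omega
  rw [← pv_set_getD_self T i [] hiT]
  rw [pv_tablefold _ i (fun jN => ((jN : Nat) : Int) ≤ L)
        (fun jN _ => if ((jN : Nat) : Int) = L then 0 else pvBestA di (jN : Int))
        T (T.getD i []) hiT (by intro j r; rfl)]
  rw [pv_set_getD_self T i [] hiT]
  congr 1
  have hrow : T.getD i [] = (List.range (lesson+2).toNat).map (fun _ => pvINF) := by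
    rw [hT, pv_getD_map_range]
    simp [Nat.lt_irrefl, pvIRn]
    omega
  rw [hrow]
  rw [pv_rowfold (fun jN => ((jN : Nat) : Int) ≤ L)
        (fun jN => if ((jN : Nat) : Int) = L then 0 else pvBestA di (jN : Int))
        (lesson+2).toNat (fun _ => pvINF) (lesson+1).toNat (by omega)]
  unfold pvMRow
  apply List.map_congr_left
  intro q hq
  rw [List.mem_range] at hq
  by_cases h1 : q < (lesson+1).toNat ∧ ((q : Nat) : Int) ≤ L
  · rw [if_pos h1, if_pos (by omega : ((q : Nat) : Int) ≤ lesson)]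
    unfold pvCostF
    rw [← hdidef, ← hLdef]
    by_cases h2 : ((q : Nat) : Int) = L
    · simp [h2]
    · rw [if_neg h2, if_neg h2, if_pos (by omega : ((q : Nat) : Int) < L)]
      unfold pvBestA
      rw [← pv_best_eq_win di (q : Int) (by omega) (by rw [← hLdef]; omega)]
  · rw [if_neg h1]
    by_cases h3 : ((q : Nat) : Int) ≤ lesson
    · rw [if_pos h3]
      unfold pvCostF
      rw [← hdidef, ← hLdef]
      rw [if_neg (by omega), if_neg (by omega)]
    · rw [if_neg h3]

def pvDRow (m : Int) (ds : List String) (lesson : Int) (i : Nat) : List Int :=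
  (List.range (lesson+2).toNat).map (fun q : Nat =>
    if (q : Int) ≤ lesson then pvDP m ds i (q : Int) else pvINF)

theorem pv_getD_rangemap_int {α : Type} (N : Nat) (f : Nat → α) (x : Int) (d : α)
    (h0 : 0 ≤ x) (h1 : x < (N : Int)) :
    PySem.List.pyGetD ((List.range N).map f) x d = f x.toNat := by
  rw [show x = ((x.toNat : Nat) : Int) from by omega, PySem.List.pyGetD_natCast,
    pv_getD_map_range, if_pos (by omega), Int.toNat_natCast]

-- A's dp table rows are the pvDP rows
theorem pv_dpa_eq (n m lesson : Int) (ds : List String) (hn : 1 ≤ n) (hl : 0 ≤ lesson) :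
    pvDPL n lesson ((List.range (n.toNat+1)).map
        (fun q => if q < n.toNat then pvMRow m ds lesson q else pvIRn lesson))
    = (List.range (n.toNat+1)).map
        (fun q => if q < n.toNat then pvDRow m ds lesson q else pvIRn lesson) := by
  unfold pvDPL
  rw [pv_map_pyRange]
  have hir : (PySem.List.pyRange 0 (lesson+2) 1).map (fun _ => pvINF) = pvIRn lesson :=
    pv_map_pyRange _ _
  rw [hir, show (n+1).toNat = n.toNat + 1 from by omega]
  have hM0 : PySem.List.pyGetD ((List.range (n.toNat+1)).map
      (fun q => if q < n.toNat then pvMRow m ds lesson q else pvIRn lesson)) (0 : Int) []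
      = pvMRow m ds lesson 0 := by
    rw [pv_getD_rangemap_int _ _ _ _ (by omega) (by push_cast; omega)]
    simp [show (0:Int).toNat = 0 from rfl, show 0 < n.toNat from by omega]
  simp only [hM0, pvSet2]
  have hset0 : ∀ (t : List (List Int)) (v : List Int), PySem.List.pySetD t 0 v = t.set 0 v :=
    fun t v => by rw [show (0:Int) = ((0:Nat):Int) from rfl, PySem.List.pySetD_natCast]
  have hget0 : ∀ (t : List (List Int)), PySem.List.pyGetD t 0 ([] : List Int) = t.getD 0 [] :=
    fun t => by rw [show (0:Int) = ((0:Nat):Int) from rfl, PySem.List.pyGetD_natCast]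
  have hinit : (PySem.List.pyRange 0 (lesson+1) 1).foldl (fun t j =>
        PySem.List.pySetD t 0 (PySem.List.pySetD (PySem.List.pyGetD t 0 []) j
          (PySem.List.pyGetD (pvMRow m ds lesson 0) j 0)))
      ((List.range (n.toNat+1)).map (fun _ => pvIRn lesson))
      = (List.range (n.toNat+1)).map
          (fun q => if q < 1 then pvDRow m ds lesson q else pvIRn lesson) := by
    rw [pv_foldl_pyRange]
    simp only [hset0, hget0, PySem.List.pySetD_natCast, PySem.List.pyGetD_natCast]
    set T := (List.range (n.toNat+1)).map (fun _ => pvIRn lesson) with hT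
    have hiT : 0 < T.length := by rw [hT]; simp
    rw [← pv_set_getD_self T 0 [] hiT]
    rw [pv_tablefold' _ 0
        (fun jN _ => (pvMRow m ds lesson 0).getD jN 0)
        T (T.getD 0 []) hiT (by intro j r; rfl)]
    have hrow : T.getD 0 [] = (List.range (lesson+2).toNat).map (fun _ => pvINF) := by
      rw [hT, pv_getD_map_range]
      simp [pvIRn]
    rw [hrow, pv_rowfold'
        (fun jN => (pvMRow m ds lesson 0).getD jN 0)
        (lesson+2).toNat (fun _ => pvINF) (lesson+1).toNat (by omega)]
    rw [hT, pv_set_map_range _ 0 _ _ (by omega)]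
    apply List.map_congr_left
    intro q hq
    rw [List.mem_range] at hq
    by_cases h1 : q = 0
    · subst h1
      rw [if_pos rfl, if_pos (by omega)]
      unfold pvDRow
      apply List.map_congr_left
      intro r hr
      rw [List.mem_range] at hr
      by_cases h2 : r < (lesson+1).toNat
      · rw [if_pos h2, if_pos (by omega : ((r : Nat) : Int) ≤ lesson)]
        unfold pvMRow
        rw [pv_getD_map_range, if_pos (by omega : r < (lesson+2).toNat),
          if_pos (by omega : ((r : Nat) : Int) ≤ lesson)]
        rfl
      · rw [if_neg h2, if_neg (by omega : ¬ ((r : Nat) : Int) ≤ lesson)]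
    · rw [if_neg h1, if_neg (by omega)]
  rw [hinit]
  rw [PySem.List.pyRange_one 1 n, List.foldl_map]
  have hcnt : 1 + (n-1).toNat = n.toNat := by omega
  have hbig := pv_outerfold (n.toNat+1) (fun _ => pvIRn lesson) (fun q => pvDRow m ds lesson q)
      (fun t iN =>
        (PySem.List.pyRange 0 (lesson+1) 1).foldl (fun t j =>
          pvSet2 t (iN : Int) j ((PySem.List.pyRange 0 (j+1) 1).foldl (fun best k =>
            min best (PySem.List.pyGetD (PySem.List.pyGetD t ((iN : Int)-1) []) (j-k) 0 +
              PySem.List.pyGetD (PySem.List.pyGetD ((List.range (n.toNat+1)).map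
                (fun q => if q < n.toNat then pvMRow m ds lesson q else pvIRn lesson)) (iN : Int) []) k 0)) pvINF)) t)
      1 (n-1).toNat (by omega) ?hbody
  case hbody =>
    intro i h1 h2
    rw [hcnt] at h2
    set T := (List.range (n.toNat+1)).map
        (fun q => if q < i then pvDRow m ds lesson q else pvIRn lesson) with hT
    have hiT : i < T.length := by rw [hT]; simp; omega
    have hMi : PySem.List.pyGetD ((List.range (n.toNat+1)).map
        (fun q => if q < n.toNat then pvMRow m ds lesson q else pvIRn lesson)) (i : Int) []
        = pvMRow m ds lesson i := by
      rw [pv_getD_rangemap_int _ _ _ _ (by omega) (by push_cast; omega), Int.toNat_natCast,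
        if_pos h2]
    have him1 : ((i : Int) - 1) = (((i-1 : Nat) : Nat) : Int) := by omega
    simp only [hMi, him1, pvSet2]
    rw [pv_foldl_pyRange]
    simp only [PySem.List.pySetD_natCast, PySem.List.pyGetD_natCast]
    rw [← pv_set_getD_self T i [] hiT]
    rw [pv_tablefold' _ i
        (fun jN t => (PySem.List.pyRange 0 ((jN : Int)+1) 1).foldl (fun best k =>
          min best (PySem.List.pyGetD (t.getD (i-1) []) ((jN : Int)-k) 0 +
            PySem.List.pyGetD (pvMRow m ds lesson i) k 0)) pvINF)
        T (T.getD i []) hiT ?hG]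
    case hG =>
      intro j r
      simp only [pv_getD_set_ne T i (i-1) r [] (by omega)]
    rw [pv_set_getD_self T i [] hiT]
    have hrow : T.getD i [] = (List.range (lesson+2).toNat).map (fun _ => pvINF) := by
      rw [hT, pv_getD_map_range, if_pos (by omega), if_neg (by omega)]
      rfl
    rw [hrow, pv_rowfold' _ (lesson+2).toNat (fun _ => pvINF) (lesson+1).toNat (by omega)]
    congr 1
    have hprev : T.getD (i-1) [] = pvDRow m ds lesson (i-1) := by
      rw [hT, pv_getD_map_range, if_pos (by omega), if_pos (by omega)]
    conv_rhs => unfold pvDRow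
    apply List.map_congr_left
    intro q hq
    rw [List.mem_range] at hq
    by_cases hq1 : q < (lesson+1).toNat
    · rw [if_pos hq1, if_pos (by omega : ((q : Nat) : Int) ≤ lesson)]
      have hrec : pvDP m ds i ((q : Nat) : Int)
          = ((PySem.List.pyRange 0 ((q : Int)+1) 1).map (fun k =>
              pvDP m ds (i-1) ((q : Int)-k) + pvCostF (pvSlotsOf m ds i) k)).foldl min pvINF := by
        rw [show i = (i-1)+1 from by omega]
        rfl
      rw [hrec, List.foldl_map]
      apply PySem.List.foldl_congr_mem
      intro acc k hk
      rw [PySem.List.mem_pyRange_one] at hk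
      have hg1 : PySem.List.pyGetD (T.getD (i-1) []) ((q : Int) - k) 0
          = pvDP m ds (i-1) ((q : Int) - k) := by
        rw [hprev]
        unfold pvDRow
        rw [pv_getD_rangemap_int _ _ _ _ (by omega) (by push_cast; omega)]
        rw [if_pos (by omega), show ((((q : Int) - k).toNat : Nat) : Int) = (q : Int) - k from by omega]
      have hg2 : PySem.List.pyGetD (pvMRow m ds lesson i) k 0 = pvCostF (pvSlotsOf m ds i) k := by
        unfold pvMRow
        rw [pv_getD_rangemap_int _ _ _ _ (by omega) (by push_cast; omega)]
        rw [if_pos (by omega), show (((k.toNat : Nat)) : Int) = k from by omega]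
      rw [hg1, hg2]
    · rw [if_neg hq1, if_neg (by omega : ¬ ((q : Nat) : Int) ≤ lesson)]
  rw [hcnt] at hbig
  rw [← hbig]
  rfl

-- A's result for n ≥ 1
theorem pv_A_eq (n m lesson : Int) (ds : List String) (hn : 1 ≤ n) (hl : 0 ≤ lesson) :
    solve_instance n m lesson ds
      = (PySem.List.min? ((PySem.List.pyRange 0 (lesson+1) 1).map
          (fun j => pvDP m ds (n.toNat-1) j)) (fun x => x)).getD 0 := by
  rw [pv_arr_to_list, pv_days_eq, pv_mcost_eq n m lesson ds (by omega) hl, pv_dpa_eq n m lesson ds hn hl]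
  have hfin : PySem.List.pyGetD ((List.range (n.toNat+1)).map
      (fun q => if q < n.toNat then pvDRow m ds lesson q else pvIRn lesson)) (n-1) []
      = pvDRow m ds lesson (n.toNat-1) := by
    rw [pv_getD_rangemap_int _ _ _ _ (by omega) (by push_cast; omega)]
    rw [if_pos (by omega), show (n-1).toNat = n.toNat - 1 from by omega]
  rw [hfin, PySem.List.slice_to _ (by omega : (0:Int) ≤ lesson+1)]
  unfold pvDRow
  rw [← List.map_take, List.take_range,
    show min (lesson+1).toNat (lesson+2).toNat = (lesson+1).toNat from by omega]
  congr 1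
  rw [pv_map_pyRange]
  congr 1
  apply List.map_congr_left
  intro q hq
  rw [List.mem_range] at hq
  rw [if_pos (by omega : ((q : Nat) : Int) ≤ lesson)]

-- both sides at n = 0
theorem pv_zero_alt (m lesson : Int) (ds : List String) :
    solve_instance_alt 0 m lesson ds = pvINF := by
  unfold solve_instance_alt
  rw [if_pos rfl]

theorem pv_zero_A (m lesson : Int) (ds : List String) (hl : 0 ≤ lesson) :
    solve_instance 0 m lesson ds = pvINF := by
  rw [pv_arr_to_list]
  unfold pvDaysA pvMCostL pvDPL
  rw [PySem.List.pyRange_one_eq_nil (le_refl (0:Int))]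
  simp only [List.foldl_nil, List.map_nil]
  have hIR : (PySem.List.pyRange 0 (lesson+2) 1).map (fun _ => pvINF) = pvIRn lesson :=
    pv_map_pyRange _ _
  rw [hIR]
  rw [show (PySem.List.pyRange 0 ((0:Int)+1) 1).map (fun _ : Int => pvIRn lesson) = [pvIRn lesson]
    from rfl]
  have hget : PySem.List.pyGetD [pvIRn lesson] (0 : Int) ([] : List Int) = pvIRn lesson := rfl
  simp only [hget]
  have hval : ∀ (j : Int), 0 ≤ j → j < lesson + 2 →
      PySem.List.pyGetD (pvIRn lesson) j 0 = pvINF := by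
    intro j h0 h1
    unfold pvIRn
    rw [pv_getD_rangemap_int _ _ _ _ h0 (by push_cast; omega)]
  have hinit : (PySem.List.pyRange 0 (lesson+1) 1).foldl (fun t j =>
        pvSet2 t 0 j (PySem.List.pyGetD (pvIRn lesson) j 0)) [pvIRn lesson]
      = [pvIRn lesson] := by
    have hbody : ∀ (t : List (List Int)) (j : Int), j ∈ PySem.List.pyRange 0 (lesson+1) 1 →
        (fun t j => pvSet2 t 0 j (PySem.List.pyGetD (pvIRn lesson) j 0)) t j
        = (fun t j => pvSet2 t 0 j pvINF) t j := by
      intro t j hj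
      rw [PySem.List.mem_pyRange_one] at hj
      simp only [hval j (by omega) (by omega)]
    rw [PySem.List.foldl_congr_mem _ _ _ _ (by intro acc x hx; exact hbody acc x hx)]
    simp only [pvSet2]
    rw [pv_foldl_pyRange]
    simp only [show ∀ (t : List (List Int)) (v : List Int), PySem.List.pySetD t 0 v = t.set 0 v from
        fun t v => by rw [show (0:Int) = ((0:Nat):Int) from rfl, PySem.List.pySetD_natCast],
      show ∀ (t : List (List Int)), PySem.List.pyGetD t 0 ([] : List Int) = t.getD 0 [] from
        fun t => by rw [show (0:Int) = ((0:Nat):Int) from rfl, PySem.List.pyGetD_natCast],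
      PySem.List.pySetD_natCast]
    have h1 : [pvIRn lesson] = ((List.range 1).map (fun _ => pvIRn lesson)).set 0
        (((List.range 1).map (fun _ => pvIRn lesson)).getD 0 []) := by
      rw [pv_set_getD_self]
      · rfl
      · simp
    rw [h1, pv_tablefold' _ 0 (fun _ _ => pvINF) ((List.range 1).map (fun _ => pvIRn lesson))
        _ (by simp) (by intro j r; rfl)]
    have hrow : ((List.range 1).map (fun _ => pvIRn lesson)).getD 0 []
        = (List.range (lesson+2).toNat).map (fun _ => pvINF) := by
      rw [pv_getD_map_range]
      simp [pvIRn]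
    rw [hrow, pv_rowfold' (fun _ => pvINF) (lesson+2).toNat (fun _ => pvINF)
        (lesson+1).toNat (by omega)]
    simp [pvIRn]
  rw [hinit]
  rw [PySem.List.pyRange_one_eq_nil (by omega : (0:Int) ≤ 1), List.foldl_nil]
  have hg : PySem.List.pyGetD [pvIRn lesson] ((0:Int)-1) [] = pvIRn lesson := by
    rw [show ((0:Int)-1) = -1 from rfl, PySem.List.pyGetD_neg_one _ _ (by simp)]
    rfl
  rw [hg, PySem.List.slice_to _ (by omega : (0:Int) ≤ lesson+1)]
  unfold pvIRn
  rw [← List.map_take, List.take_range,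
    show min (lesson+1).toNat (lesson+2).toNat = (lesson+1).toNat from by omega]
  rw [show (lesson+1).toNat = ((lesson+1).toNat - 1) + 1 from by omega, List.range_succ_eq_map,
    List.map_cons, PySem.List.min?_id_cons]
  simp only [Option.getD_some]
  apply pv_foldl_min_const
  intro x hx
  rcases List.mem_map.mp hx with ⟨y, _, h⟩
  exact h.symm

-- ===== B-side: capped min-plus algebra =====

def pvMix (F G : Int → Int) (j : Int) : Int :=
  ((PySem.List.pyRange 0 (j+1) 1).map (fun k => F (j - k) + G k)).foldl min pvINF

theorem pv_foldl_min_le_seed : ∀ (l : List Int) (a : Int), l.foldl min a ≤ a := by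
  intro l
  induction l with
  | nil => intro a; exact le_refl a
  | cons x t ih => intro a; exact le_trans (ih (min a x)) (min_le_left a x)

theorem pv_M_append (l1 l2 : List Int) :
    (l1 ++ l2).foldl min pvINF = min (l1.foldl min pvINF) (l2.foldl min pvINF) := by
  rw [List.foldl_append]
  have h := pv_min_foldl l2 (l1.foldl min pvINF) pvINF
  rw [min_eq_left (pv_foldl_min_le_seed l1 pvINF)] at h
  exact h.symm

theorem pv_capcongr_aux {α : Type} (u v : α → Int) :
    ∀ (l : List α) (a : Int), a ≤ pvINF →
    (∀ x ∈ l, min pvINF (u x) = min pvINF (v x)) →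
    (l.map u).foldl min a = (l.map v).foldl min a := by
  intro l
  induction l with
  | nil => intros; rfl
  | cons x t ih =>
    intro a ha h
    simp only [List.map_cons, List.foldl_cons]
    have key : ∀ w : Int, min a w = min a (min pvINF w) := by
      intro w; rw [← min_assoc, min_eq_left ha]
    rw [key (u x), h x (by simp), ← key (v x)]
    exact ih (min a (v x)) (le_trans (min_le_left _ _) ha) (fun y hy => h y (by simp [hy]))

theorem pv_capcongr {α : Type} (l : List α) (u v : α → Int)
    (h : ∀ x ∈ l, min pvINF (u x) = min pvINF (v x)) :
    (l.map u).foldl min pvINF = (l.map v).foldl min pvINF :=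
  pv_capcongr_aux u v l pvINF (le_refl _) h

theorem pv_cap_add_aux (c : Int) :
    ∀ (l : List Int) (a : Int),
    min pvINF (l.foldl min a + c) = (l.map (fun x => x + c)).foldl min (min pvINF (a + c)) := by
  intro l
  induction l with
  | nil => intro a; rfl
  | cons x t ih =>
    intro a
    simp only [List.foldl_cons, List.map_cons]
    rw [ih (min a x)]
    have h1 : min a x + c = min (a + c) (x + c) := by omega
    rw [h1, ← min_assoc]

theorem pv_cap_add_right (l : List Int) (c : Int) (hc : 0 ≤ c) :
    min pvINF (l.foldl min pvINF + c) = (l.map (fun x => x + c)).foldl min pvINF := by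
  rw [pv_cap_add_aux c l pvINF, min_eq_left (by omega : pvINF ≤ pvINF + c)]

theorem pv_cap_add_left (l : List Int) (c : Int) (hc : 0 ≤ c) :
    min pvINF (c + l.foldl min pvINF) = (l.map (fun x => c + x)).foldl min pvINF := by
  rw [add_comm c, pv_cap_add_right l c hc]
  exact congrArg (fun t => t.foldl min pvINF) (List.map_congr_left (fun x _ => add_comm x c))

theorem pv_flat_aux {α : Type} (g : α → List Int) :
    ∀ (l : List α) (a : Int), a ≤ pvINF →
    (l.map (fun k => (g k).foldl min pvINF)).foldl min a = (l.flatMap g).foldl min a := by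
  intro l
  induction l with
  | nil => intros; rfl
  | cons x t ih =>
    intro a ha
    simp only [List.map_cons, List.foldl_cons, List.flatMap_cons, List.foldl_append]
    have hseed : (g x).foldl min a = min a ((g x).foldl min pvINF) := by
      rw [pv_min_foldl, min_eq_left ha]
    rw [hseed]
    exact ih (min a ((g x).foldl min pvINF)) (le_trans (min_le_left _ _) ha)

theorem pv_M_flat {α : Type} (l : List α) (g : α → List Int) :
    (l.map (fun k => (g k).foldl min pvINF)).foldl min pvINF = (l.flatMap g).foldl min pvINF :=
  pv_flat_aux g l pvINF (le_refl _)

theorem pv_flatMap_congr_mem {α β : Type} :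
    ∀ (l : List α) (f g : α → List β), (∀ x ∈ l, f x = g x) → l.flatMap f = l.flatMap g := by
  intro l
  induction l with
  | nil => intros; rfl
  | cons x t ih =>
    intro f g h
    simp only [List.flatMap_cons]
    rw [h x (by simp), ih f g (fun y hy => h y (by simp [hy]))]

theorem pv_flatMap_singleton {α β : Type} :
    ∀ (l : List α) (e : α → β), l.flatMap (fun x => [e x]) = l.map e := by
  intro l
  induction l with
  | nil => intros; rfl
  | cons x t ih =>
    intro e
    simp only [List.flatMap_cons, List.map_cons, List.singleton_append]
    rw [ih e]

theorem pv_flat_split {α : Type} (g1 g2 : α → List Int) :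
    ∀ (l : List α),
    (l.flatMap (fun k => g1 k ++ g2 k)).foldl min pvINF
      = min ((l.flatMap g1).foldl min pvINF) ((l.flatMap g2).foldl min pvINF) := by
  intro l
  induction l with
  | nil => simp
  | cons x t ih =>
    simp only [List.flatMap_cons]
    rw [pv_M_append, pv_M_append, pv_M_append, pv_M_append, ih]
    exact min_min_min_comm _ _ _ _

theorem pv_M_flat_range_succ (g : Nat → List Int) (n : Nat) :
    ((List.range (n+1)).flatMap g).foldl min pvINF
      = min (((List.range n).flatMap g).foldl min pvINF) ((g n).foldl min pvINF) := by
  rw [List.range_succ, List.flatMap_append, pv_M_append,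
    show ([n] : List Nat).flatMap g = g n from by simp]

-- triangle reindexing: row-major vs antidiagonal-major enumeration
theorem pv_tri (w : Nat → Nat → Int) : ∀ (J : Nat),
    ((List.range (J+1)).flatMap (fun k => (List.range (J-k+1)).map (fun u => w k u))).foldl min pvINF
  = ((List.range (J+1)).flatMap (fun s => (List.range (s+1)).map (fun k => w k (s-k)))).foldl min pvINF := by
  intro J
  induction J with
  | zero => rfl
  | succ J ih =>
    rw [pv_M_flat_range_succ (fun k => (List.range (J+1-k+1)).map (fun u => w k u)) (J+1)]
    rw [pv_M_flat_range_succ (fun s => (List.range (s+1)).map (fun k => w k (s-k))) (J+1)]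
    have hg : ∀ k ∈ List.range (J+1),
        (List.range (J+1-k+1)).map (fun u => w k u)
          = (List.range (J-k+1)).map (fun u => w k u) ++ [w k (J-k+1)] := by
      intro k hk
      rw [List.mem_range] at hk
      rw [show J+1-k+1 = (J-k+1)+1 from by omega, List.range_succ, List.map_append]
      rfl
    rw [pv_flatMap_congr_mem _ _ _ hg, pv_flat_split, ih, pv_flatMap_singleton]
    rw [show J+1-(J+1)+1 = 1 from by omega]
    have hdiag : (List.range ((J+1)+1)).map (fun k => w k (J+1-k))
        = (List.range (J+1)).map (fun k => w k (J-k+1)) ++ [w (J+1) 0] := by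
      rw [List.range_succ, List.map_append]
      congr 1
      · apply List.map_congr_left
        intro k hk
        rw [List.mem_range] at hk
        rw [show J+1-k = J-k+1 from by omega]
      · simp
    rw [hdiag, pv_M_append]
    rw [show ((List.range 1).map (fun u => w (J+1) u)).foldl min pvINF = min pvINF (w (J+1) 0) from rfl]
    rw [show ([w (J+1) 0]).foldl min pvINF = min pvINF (w (J+1) 0) from rfl]
    omega

-- ===== nonnegativity of cost vectors =====

theorem pv_foldl_min_nonneg : ∀ (l : List Int) (a : Int), 0 ≤ a → (∀ x ∈ l, 0 ≤ x) → 0 ≤ l.foldl min a := by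
  intro l
  induction l with
  | nil => intro a ha _; exact ha
  | cons x t ih =>
    intro a ha h
    simp only [List.foldl_cons]
    exact ih (min a x) (le_min ha (h x (by simp))) (fun y hy => h y (by simp [hy]))

theorem pv_slots_sorted (m : Int) (ds : List String) (i : Int) :
    (pvSlotsB m ds i).Pairwise (· < ·) := by
  unfold pvSlotsB
  exact List.Pairwise.map _ (fun a b h => by omega)
    (List.Pairwise.filter _ (PySem.List.pairwise_lt_pyRange_one 0 m))

theorem pv_pyGetD_mono (s : List Int) (hs : s.Pairwise (· < ·)) (a b : Int)
    (h0 : 0 ≤ a) (hab : a ≤ b) (hb : b < PySem.List.len s) :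
    PySem.List.pyGetD s a 0 ≤ PySem.List.pyGetD s b 0 := by
  have hlen : PySem.List.len s = (s.length : Int) := by simp
  rw [hlen] at hb
  rw [PySem.List.pyGetD_eq_getElem s 0 (by omega) (by omega),
      PySem.List.pyGetD_eq_getElem s 0 (by omega) (by omega)]
  rcases eq_or_lt_of_le hab with h | h
  · subst h; exact le_refl _
  · have := (List.pairwise_iff_getElem.mp hs) a.toNat b.toNat (by omega) (by omega) (by omega)
    exact le_of_lt this

theorem pv_costF_nonneg (s : List Int) (hs : s.Pairwise (· < ·)) (j : Int) :
    0 ≤ pvCostF s j := by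
  unfold pvCostF
  by_cases h1 : j = PySem.List.len s
  · rw [if_pos h1]
  · rw [if_neg h1]
    by_cases h2 : j < PySem.List.len s
    · rw [if_pos h2]
      unfold pvWin
      apply pv_foldl_min_nonneg _ _ (by norm_num [pvINF])
      intro x hx
      rcases List.mem_map.mp hx with ⟨t, ht, rfl⟩
      rw [PySem.List.mem_pyRange_one] at ht
      rcases lt_or_ge j 0 with hj | hj
      · omega
      · have hmono := pv_pyGetD_mono s hs t (t + (PySem.List.len s - j) - 1)
          (by omega) (by omega) (by omega)
        omega
    · rw [if_neg h2]; norm_num [pvINF]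

theorem pv_mix_nonneg (F G : Int → Int) (hF : ∀ x, 0 ≤ F x) (hG : ∀ x, 0 ≤ G x) (j : Int) :
    0 ≤ pvMix F G j := by
  unfold pvMix
  apply pv_foldl_min_nonneg _ _ (by norm_num [pvINF])
  intro x hx
  rcases List.mem_map.mp hx with ⟨k, _, rfl⟩
  have := hF (j - k); have := hG k
  omega

-- ===== associativity of the capped min-plus mix =====

theorem pv_mix_assoc (F G H : Int → Int) (hF : ∀ x, 0 ≤ F x) (hG : ∀ x, 0 ≤ G x)
    (hH : ∀ x, 0 ≤ H x) (j : Int) :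
    pvMix (pvMix F G) H j = pvMix F (pvMix G H) j := by
  rcases lt_or_ge j 0 with hj | hj
  · show ((PySem.List.pyRange 0 (j+1) 1).map _).foldl min pvINF
      = ((PySem.List.pyRange 0 (j+1) 1).map _).foldl min pvINF
    rw [PySem.List.pyRange_one_eq_nil (by omega : j + 1 ≤ (0:Int))]
    rfl
  · obtain ⟨J, rfl⟩ : ∃ J : Nat, j = (J : Int) := ⟨j.toNat, by omega⟩
    have hcut : ∀ {α : Type} (b : Nat) (f : Int → α),
        (PySem.List.pyRange 0 ((b : Nat) : Int) 1).map f
          = (List.range b).map (fun k : Nat => f (k : Int)) := by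
      intro α b f
      rw [pv_map_pyRange, Int.toNat_natCast]
    -- LHS → row-major triangle
    have hL : pvMix (pvMix F G) H (J : Int)
        = ((List.range (J+1)).flatMap (fun k => (List.range (J-k+1)).map (fun u =>
            F (((J-k-u : Nat)) : Int) + G ((u : Nat) : Int) + H ((k : Nat) : Int)))).foldl min pvINF := by
      have h1 : pvMix (pvMix F G) H (J : Int)
          = ((List.range (J+1)).map (fun k : Nat =>
              pvMix F G ((J : Int) - (k : Int)) + H ((k : Nat) : Int))).foldl min pvINF := by
        show ((PySem.List.pyRange 0 ((J : Int)+1) 1).map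
            (fun k => pvMix F G ((J : Int) - k) + H k)).foldl min pvINF = _
        rw [show ((J : Int)+1) = (((J+1 : Nat)) : Int) from by omega, hcut]
      rw [h1, ← pv_M_flat]
      apply pv_capcongr
      intro k hk
      rw [List.mem_range] at hk
      have h2 : pvMix F G ((J : Int) - (k : Int))
          = ((List.range (J-k+1)).map (fun u : Nat =>
              F ((J : Int) - (k : Int) - (u : Int)) + G ((u : Nat) : Int))).foldl min pvINF := by
        show ((PySem.List.pyRange 0 ((J : Int) - (k : Int) + 1) 1).map
            (fun u => F ((J : Int) - (k : Int) - u) + G u)).foldl min pvINF = _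
        rw [show ((J : Int) - (k : Int) + 1) = (((J-k+1 : Nat)) : Int) from by omega, hcut]
      rw [h2, pv_cap_add_right _ _ (hH _), List.map_map]
      have h3 : ((List.range (J-k+1)).map ((fun x => x + H ((k : Nat) : Int)) ∘
            (fun u : Nat => F ((J : Int) - (k : Int) - (u : Int)) + G ((u : Nat) : Int))))
          = (List.range (J-k+1)).map (fun u : Nat =>
              F (((J-k-u : Nat)) : Int) + G ((u : Nat) : Int) + H ((k : Nat) : Int)) := by
        apply List.map_congr_left
        intro u hu
        rw [List.mem_range] at hu
        simp only [Function.comp]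
        rw [show ((J : Int) - (k : Int) - (u : Int)) = (((J-k-u : Nat)) : Int) from by omega]
      rw [h3]
      exact (min_eq_right (pv_foldl_min_le_seed _ _)).symm
    -- RHS → antidiagonal-major triangle
    have hR : pvMix F (pvMix G H) (J : Int)
        = ((List.range (J+1)).flatMap (fun s => (List.range (s+1)).map (fun k =>
            F (((J-k-(s-k) : Nat)) : Int) + G (((s-k : Nat)) : Int) + H ((k : Nat) : Int)))).foldl min pvINF := by
      have h1 : pvMix F (pvMix G H) (J : Int)
          = ((List.range (J+1)).map (fun s : Nat =>
              F ((J : Int) - (s : Int)) + pvMix G H ((s : Nat) : Int))).foldl min pvINF := by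
        show ((PySem.List.pyRange 0 ((J : Int)+1) 1).map
            (fun s => F ((J : Int) - s) + pvMix G H s)).foldl min pvINF = _
        rw [show ((J : Int)+1) = (((J+1 : Nat)) : Int) from by omega, hcut]
      rw [h1, ← pv_M_flat]
      apply pv_capcongr
      intro s hs
      rw [List.mem_range] at hs
      have h2 : pvMix G H ((s : Nat) : Int)
          = ((List.range (s+1)).map (fun u : Nat =>
              G ((s : Int) - (u : Int)) + H ((u : Nat) : Int))).foldl min pvINF := by
        show ((PySem.List.pyRange 0 ((s : Int) + 1) 1).map
            (fun u => G ((s : Int) - u) + H u)).foldl min pvINF = _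
        rw [show ((s : Int) + 1) = (((s+1 : Nat)) : Int) from by omega, hcut]
      rw [h2, pv_cap_add_left _ _ (hF _), List.map_map]
      have h3 : ((List.range (s+1)).map ((fun x => F ((J : Int) - (s : Int)) + x) ∘
            (fun u : Nat => G ((s : Int) - (u : Int)) + H ((u : Nat) : Int))))
          = (List.range (s+1)).map (fun k : Nat =>
              F (((J-k-(s-k) : Nat)) : Int) + G (((s-k : Nat)) : Int) + H ((k : Nat) : Int)) := by
        apply List.map_congr_left
        intro u hu
        rw [List.mem_range] at hu
        simp only [Function.comp]
        rw [show ((J : Int) - (s : Int)) = (((J-u-(s-u) : Nat)) : Int) from by omega,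
            show ((s : Int) - (u : Int)) = (((s-u : Nat)) : Int) from by omega, add_assoc]
      rw [h3]
      exact (min_eq_right (pv_foldl_min_le_seed _ _)).symm
    rw [hL, hR]
    exact pv_tri (fun k u => F (((J-k-u : Nat)) : Int) + G ((u : Nat) : Int) + H ((k : Nat) : Int)) J

-- ===== B's pieces characterized =====

theorem pv_costvec_eq (m lesson : Int) (ds : List String) (i : Int) :
    pvCostVecB m lesson ds i
      = (PySem.List.pyRange 0 (lesson+1) 1).map (fun j => pvCostF (pvSlotsB m ds i) j) := by
  unfold pvCostVecB pvCostF pvWin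
  apply List.map_congr_left
  intro j hj
  rw [PySem.List.mem_pyRange_one] at hj
  by_cases h1 : PySem.List.len (pvSlotsB m ds i) < j
  · rw [if_pos h1, if_neg (by omega), if_neg (by omega)]
  · rw [if_neg h1]
    by_cases h2 : j = PySem.List.len (pvSlotsB m ds i)
    · rw [if_pos h2, if_pos h2]
    · rw [if_neg h2, if_neg h2, if_pos (by omega)]
      exact pv_minq _ _ (by omega) _

theorem pv_merge_vec (lesson : Int) (F G : Int → Int) :
    pvMergeB ((PySem.List.pyRange 0 (lesson+1) 1).map F)
             ((PySem.List.pyRange 0 (lesson+1) 1).map G) lesson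
      = (PySem.List.pyRange 0 (lesson+1) 1).map (fun j => pvMix F G j) := by
  unfold pvMergeB
  apply List.map_congr_left
  intro j hj
  rw [PySem.List.mem_pyRange_one] at hj
  have hmap : (PySem.List.pyRange 0 (j+1) 1).map (fun k =>
        PySem.List.pyGetD ((PySem.List.pyRange 0 (lesson+1) 1).map F) (j-k) 0 +
        PySem.List.pyGetD ((PySem.List.pyRange 0 (lesson+1) 1).map G) k 0)
      = (PySem.List.pyRange 0 (j+1) 1).map (fun k => F (j-k) + G k) := by
    apply List.map_congr_left
    intro k hk
    rw [PySem.List.mem_pyRange_one] at hk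
    rw [PySem.List.pyGetD_map_pyRange_of_nonneg _ _ _ _ (by omega) (by omega),
        PySem.List.pyGetD_map_pyRange_of_nonneg _ _ _ _ (by omega) (by omega)]
  rw [hmap, pv_minq _ _ (by omega)]
  rfl

-- ===== segments of days, combined left-to-right =====

def pvSeg (m : Int) (ds : List String) (lo : Nat) : Nat → Int → Int
  | 0 => fun j => pvCostF (pvSlotsOf m ds lo) j
  | (c+1) => pvMix (pvSeg m ds lo c) (fun j => pvCostF (pvSlotsOf m ds (lo+c+1)) j)

theorem pv_seg_nonneg (m : Int) (ds : List String) (lo : Nat) :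
    ∀ (c : Nat) (j : Int), 0 ≤ pvSeg m ds lo c j := by
  intro c
  induction c with
  | zero => intro j; exact pv_costF_nonneg _ (pv_slots_sorted m ds _) j
  | succ c ih =>
    intro j
    exact pv_mix_nonneg _ _ ih (fun x => pv_costF_nonneg _ (pv_slots_sorted m ds _) x) j

theorem pv_seg_concat (m : Int) (ds : List String) (lo c : Nat) :
    ∀ (d : Nat) (j : Int),
    pvSeg m ds lo (c + d + 1) j = pvMix (pvSeg m ds lo c) (pvSeg m ds (lo + c + 1) d) j := by
  intro d
  induction d with
  | zero => intro j; rfl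
  | succ d ih =>
    intro j
    have hfun : pvSeg m ds lo (c + d + 1) = fun j' => pvMix (pvSeg m ds lo c) (pvSeg m ds (lo + c + 1) d) j' :=
      funext ih
    show pvMix (pvSeg m ds lo (c + d + 1)) (fun x => pvCostF (pvSlotsOf m ds (lo + (c + d + 1) + 1)) x) j = _
    rw [hfun]
    rw [show lo + (c + d + 1) + 1 = (lo + c + 1) + d + 1 from by omega]
    exact pv_mix_assoc (pvSeg m ds lo c) (pvSeg m ds (lo + c + 1) d)
      (fun x => pvCostF (pvSlotsOf m ds ((lo + c + 1) + d + 1)) x)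
      (pv_seg_nonneg m ds lo c) (pv_seg_nonneg m ds (lo + c + 1) d)
      (fun x => pv_costF_nonneg _ (pv_slots_sorted m ds _) x) j

theorem pv_seg0_dp (m : Int) (ds : List String) :
    ∀ (c : Nat) (j : Int), pvSeg m ds 0 c j = pvDP m ds c j := by
  intro c
  induction c with
  | zero => intro j; rfl
  | succ c ih =>
    intro j
    have hfun : pvSeg m ds 0 c = pvDP m ds c := funext ih
    show pvMix (pvSeg m ds 0 c) (fun x => pvCostF (pvSlotsOf m ds (0 + c + 1)) x) j = _
    rw [hfun, show (0 + c + 1 : Nat) = c + 1 from by omega]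
    rfl

-- B's recursion computes the segment vectors (fuel ≥ segment length suffices)
theorem pv_total_eq (m lesson : Int) (ds : List String) :
    ∀ (fuel : Nat) (cnt : Nat) (lo : Nat), cnt < fuel →
    pvTotalB m lesson ds fuel (lo : Int) ((lo : Int) + ((cnt : Int) + 1))
      = (PySem.List.pyRange 0 (lesson+1) 1).map (fun j => pvSeg m ds lo cnt j) := by
  intro fuel
  induction fuel with
  | zero => intro cnt lo h; omega
  | succ f ih =>
    intro cnt lo hcnt
    rw [pvTotalB]
    by_cases h0 : cnt = 0
    · subst h0
      rw [if_pos (by omega)]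
      rw [pv_costvec_eq]
      rfl
    · rw [if_neg (by omega)]
      have hc1 : 1 ≤ (cnt+1)/2 ∧ (cnt+1)/2 ≤ cnt := by omega
      set c1 : Nat := (cnt+1)/2 with hc1def
      have hmid : PySem.Int.floordiv ((lo : Int) + ((lo : Int) + ((cnt : Int) + 1))) 2
          = ((lo + c1 : Nat) : Int) := by
        rw [PySem.Int.floordiv_eq_ediv_of_pos (by omega : (0:Int) < 2)]
        omega
      rw [hmid]
      have e1 : ((lo + c1 : Nat) : Int) = (lo : Int) + (((c1 - 1 : Nat) : Int) + 1) := by omega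
      have e2 : ((lo : Int) + ((cnt : Int) + 1)) = ((lo + c1 : Nat) : Int) + (((cnt - c1 : Nat) : Int) + 1) := by omega
      rw [show pvTotalB m lesson ds f (lo : Int) (((lo + c1 : Nat)) : Int)
            = pvTotalB m lesson ds f (lo : Int) ((lo : Int) + (((c1 - 1 : Nat) : Int) + 1)) from by rw [← e1]]
      rw [show pvTotalB m lesson ds f (((lo + c1 : Nat)) : Int) ((lo : Int) + ((cnt : Int) + 1))
            = pvTotalB m lesson ds f (((lo + c1 : Nat)) : Int) (((lo + c1 : Nat) : Int) + (((cnt - c1 : Nat) : Int) + 1)) from by rw [← e2]]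
      rw [ih (c1 - 1) lo (by omega), ih (cnt - c1) (lo + c1) (by omega)]
      rw [pv_merge_vec]
      apply List.map_congr_left
      intro j hj
      have h := pv_seg_concat m ds lo (c1 - 1) (cnt - c1) j
      rw [show (c1 - 1) + (cnt - c1) + 1 = cnt from by omega,
          show lo + (c1 - 1) + 1 = lo + c1 from by omega] at h
      exact h.symm

-- B's result for n ≥ 1
theorem pv_alt_eq (n m lesson : Int) (ds : List String) (hn : 1 ≤ n) :
    solve_instance_alt n m lesson ds
      = (PySem.List.min? ((PySem.List.pyRange 0 (lesson+1) 1).map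
          (fun j => pvDP m ds (n.toNat-1) j)) (fun x => x)).getD 0 := by
  unfold solve_instance_alt
  rw [if_neg (by omega)]
  have h := pv_total_eq m lesson ds n.toNat (n.toNat - 1) 0 (by omega)
  simp only [Nat.cast_zero, zero_add] at h
  conv_lhs => rw [show n = (((n.toNat - 1 : Nat)) : Int) + 1 from by omega]
  rw [show ((((n.toNat - 1 : Nat)) : Int) + 1).toNat = n.toNat from by omega, h]
  exact congrArg (fun L => (PySem.List.min? L (fun x => x)).getD 0)
    (List.map_congr_left (fun j _ => pv_seg0_dp m ds (n.toNat - 1) j))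

-- ===== VERDICT (by name: the statement is the Claim_ definition above) =====
theorem solve_instance_spec : Claim_equal_solve_instance := by
  intro n m lesson ds hdom hpre
  unfold Spec_solve_instance
  obtain ⟨hn, hl, -, -⟩ := hpre
  rcases lt_or_ge n 1 with h1 | h1
  · have hz : n = 0 := by omega
    subst hz
    rw [pv_zero_A m lesson ds hl, pv_zero_alt m lesson ds]
  · rw [pv_A_eq n m lesson ds h1 hl, pv_alt_eq n m lesson ds h1]
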